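-- pv_equiv track=rewrite | github.com/Douglas616/Proyecto_Fase3 | app5a.py | clasificarr_sentimientos
-- ===== SOURCE A (Python) =====
-- def clasificarr_sentimientos(texto, positivos, negativos):
--     texto = texto.lower()
--     puntos = {"positivo": 0, "negativo": 0}
--
--     for palabra in positivos:
--         if palabra in texto:
--             puntos["positivo"] += 1
--     for palabra in negativos:
--         if palabra in texto:
--             puntos["negativo"] += 1
--
--     if puntos["positivo"] > puntos["negativo"]:
--         return "positivo"
--     elif puntos["negativo"] > puntos["positivo"]:
--         return "negativo"
--     else:
--         return "neutro"
-- ===== SOURCE B (Python) =====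
-- def clasificarr_sentimientos(texto, positivos, negativos):
--     # Substring hash index: build, once, the set of ALL substrings of the lowered
--     # text up to the longest word's length; every word is then a single O(1) set
--     # lookup instead of its own substring search over the whole text.
--     t = texto.lower()
--     L = 0
--     for p in positivos:
--         L = max(L, len(p))
--     for p in negativos:
--         L = max(L, len(p))
--     subs = set()
--     for l in range(min(L, len(t)) + 1):
--         for i in range(len(t) - l + 1):
--             subs.add(t[i:i + l])
--     pos = 0
--     for p in positivos:
--         if p in subs:
--             pos += 1
--     neg = 0
--     for p in negativos:
--         if p in subs:
--             neg += 1
--     if pos > neg: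
--         return "positivo"
--     if neg > pos:
--         return "negativo"
--     return "neutro"
-- ===== Notes on version B (the rewrite author's own statement) =====
-- stated objective: faster
-- what changed: Replaces A's per-word substring search over the whole text by a substring hash index: B builds, once, the set of all substrings of the lowered text up to the longest word's length, so each word becomes a single set lookup instead of its own scan of the text.
import Mathlib
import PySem

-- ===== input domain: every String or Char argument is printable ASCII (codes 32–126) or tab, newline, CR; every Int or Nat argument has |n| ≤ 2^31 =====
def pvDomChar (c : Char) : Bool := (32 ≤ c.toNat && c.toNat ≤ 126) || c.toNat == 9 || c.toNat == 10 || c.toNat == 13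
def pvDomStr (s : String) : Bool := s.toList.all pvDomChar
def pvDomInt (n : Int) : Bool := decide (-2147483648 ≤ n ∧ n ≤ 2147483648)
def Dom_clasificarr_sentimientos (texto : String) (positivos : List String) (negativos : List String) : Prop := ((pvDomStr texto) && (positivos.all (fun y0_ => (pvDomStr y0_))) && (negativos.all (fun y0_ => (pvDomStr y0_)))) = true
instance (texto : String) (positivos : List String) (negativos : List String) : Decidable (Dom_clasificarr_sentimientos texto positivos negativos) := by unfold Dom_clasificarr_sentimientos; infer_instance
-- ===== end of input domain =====

-- B replaces A's per-word substring searches by a substring hash index built once from the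
-- lowered text (all substrings up to the longest word's length), turning each word's check
-- into a single set lookup (objective: faster; measured).


-- ===== PORT A =====
-- literal transliteration of A: lower the text, build the {"positivo","negativo"} counter dict
-- with two membership loops, then the three-way comparison of the two counts.
-- puntos["k"] += 1 is ported as insert k (getD k 0 + 1): both keys are present from the start,
-- so getD with default 0 reads exactly the value Python's puntos["k"] reads.
def clasificarr_sentimientos (texto : String) (positivos : List String) (negativos : List String) : String :=
  let texto := PySem.Str.lower texto
  let puntos : PySem.Dict String Int := PySem.Dict.ofList [("positivo", 0), ("negativo", 0)]
  let puntos := positivos.foldl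
    (fun d palabra => if PySem.Str.isIn palabra texto then d.insert "positivo" (d.getD "positivo" 0 + 1) else d) puntos
  let puntos := negativos.foldl
    (fun d palabra => if PySem.Str.isIn palabra texto then d.insert "negativo" (d.getD "negativo" 0 + 1) else d) puntos
  if puntos.getD "positivo" 0 > puntos.getD "negativo" 0 then "positivo"
  else if puntos.getD "negativo" 0 > puntos.getD "positivo" 0 then "negativo"
  else "neutro"

-- ===== PORT B =====
-- literal transliteration of B (Source B): take the max word length L with two max-loops, build
-- the set of all substrings of the lowered text of length 0..min(L, len(t)) with the nested
-- range loops ('t[i:i+l]' is PySem.List.slice, 'set.add' is PySem.Set.add), then count each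
-- word list with one O(1)-lookup loop ('p in subs' is PySem.Set.contains).
def pvMaxLen (l : List String) (acc : Nat) : Nat :=
  l.foldl (fun a p => max a p.toList.length) acc

-- t[i:i + l] as Source B writes it (i, l are the loop's range values, hence Nat)
def pvSliceAt (t : List Char) (i l : Nat) : List Char :=
  PySem.List.slice t (some (i : Int)) (some ((i : Int) + (l : Int)))

def pvSubs (t : List Char) (L : Nat) : PySem.Set (List Char) :=
  (List.range (min L t.length + 1)).foldl
    (fun s l =>
      (List.range (t.length - l + 1)).foldl
        (fun s i => PySem.Set.add s (pvSliceAt t i l)) s)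
    PySem.Set.empty

def pvCountIn (subs : PySem.Set (List Char)) (l : List String) (c : Int) : Int :=
  l.foldl (fun c p => if PySem.Set.contains subs p.toList then c + 1 else c) c

def clasificarr_sentimientos_alt (texto : String) (positivos : List String) (negativos : List String) : String :=
  let t := (PySem.Str.lower texto).toList
  let L := pvMaxLen negativos (pvMaxLen positivos 0)
  let subs := pvSubs t L
  let pos := pvCountIn subs positivos 0
  let neg := pvCountIn subs negativos 0
  if pos > neg then "positivo"
  else if neg > pos then "negativo"
  else "neutro"

-- ===== PRECONDITION & SPEC =====
def Spec_clasificarr_sentimientos (texto : String) (positivos : List String) (negativos : List String) (out : String) : Prop := out = clasificarr_sentimientos_alt texto positivos negativos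
instance (texto : String) (positivos : List String) (negativos : List String) (out : String) : Decidable (Spec_clasificarr_sentimientos texto positivos negativos out) := by unfold Spec_clasificarr_sentimientos; infer_instance

-- ===== CLAIM (what is proved, stated in full; the proofs are below) =====
def Claim_equal_clasificarr_sentimientos : Prop := ∀ (texto : String) (positivos : List String) (negativos : List String), Dom_clasificarr_sentimientos texto positivos negativos → Spec_clasificarr_sentimientos texto positivos negativos (clasificarr_sentimientos texto positivos negativos)

-- ===== LEMMAS AND PROOFS =====

-- A side: a counting loop over key k leaves every other key untouched
theorem pv_foldl_getD_other (t : String) (k k' : String) (h : (k' == k) = false)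
    (l : List String) (d : PySem.Dict String Int) :
    (l.foldl (fun d p => if PySem.Str.isIn p t then d.insert k (d.getD k 0 + 1) else d) d).getD k' 0
      = d.getD k' 0 := by
  induction l generalizing d with
  | nil => rfl
  | cons x xs ih =>
    simp only [List.foldl_cons]
    split
    · rw [ih]; simp [pysem]
      intro hk; subst hk; simp at h
    · exact ih d

-- A side: a counting loop over key k adds the number of matching words to that key's value
theorem pv_foldl_getD_self (t : String) (k : String)
    (l : List String) (d : PySem.Dict String Int) :
    (l.foldl (fun d p => if PySem.Str.isIn p t then d.insert k (d.getD k 0 + 1) else d) d).getD k 0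
      = d.getD k 0 + (l.countP (fun p => PySem.Str.isIn p t) : Int) := by
  induction l generalizing d with
  | nil => simp
  | cons x xs ih =>
    simp only [List.foldl_cons, List.countP_cons]
    by_cases hx : PySem.Str.isIn x t
    · rw [if_pos hx, ih]
      have hx' : PySem.Chars.isIn x.toList t.toList = true := by simpa using hx
      simp [pysem, hx']
      ring
    · rw [if_neg hx, ih]
      have hx' : PySem.Chars.isIn x.toList t.toList = false := by simpa using hx
      simp [hx']

-- B side: the counting loop is a countP shifted by the accumulator
theorem pv_countIn_eq (subs : PySem.Set (List Char)) (l : List String) (c : Int) :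
    pvCountIn subs l c = c + (l.countP (fun p => PySem.Set.contains subs p.toList) : Int) := by
  unfold pvCountIn
  induction l generalizing c with
  | nil => simp
  | cons x xs ih =>
    simp only [List.foldl_cons, List.countP_cons]
    by_cases hx : PySem.Set.contains subs x.toList
    · rw [if_pos hx, ih, hx]; simp; omega
    · rw [if_neg hx, ih, Bool.eq_false_iff.mpr hx]; simp

-- B side: the max-length loop dominates its accumulator …
theorem pv_maxLen_le (l : List String) (acc : Nat) : acc ≤ pvMaxLen l acc := by
  unfold pvMaxLen
  induction l generalizing acc with
  | nil => simp
  | cons x xs ih => exact le_trans (Nat.le_max_left _ _) (ih _)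

-- … and every list member's length
theorem pv_mem_maxLen (l : List String) (acc : Nat) (p : String) (hp : p ∈ l) :
    p.toList.length ≤ pvMaxLen l acc := by
  induction l generalizing acc with
  | nil => cases hp
  | cons x xs ih =>
    rcases List.mem_cons.mp hp with h | h
    · subst h
      exact le_trans (Nat.le_max_right acc _) (pv_maxLen_le xs _)
    · exact ih _ h

-- B side: t[i:i+l] is take-of-drop
theorem pv_sliceAt_eq (t : List Char) (i l : Nat) :
    pvSliceAt t i l = (t.drop i).take l := by
  unfold pvSliceAt
  exact PySem.List.slice_natCast_add t i l

-- B side: membership in the substring index, unfolded to the generating slices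
theorem pv_mem_subs (t : List Char) (L : Nat) (p : List Char) :
    p ∈ pvSubs t L ↔ ∃ l ∈ List.range (min L t.length + 1), ∃ i ∈ List.range (t.length - l + 1),
      p = pvSliceAt t i l := by
  unfold pvSubs
  generalize List.range (min L t.length + 1) = outer
  have base : ∀ (os : List Nat) (s₀ : PySem.Set (List Char)),
      p ∈ os.foldl (fun s l => (List.range (t.length - l + 1)).foldl
          (fun s i => PySem.Set.add s (pvSliceAt t i l)) s) s₀
        ↔ p ∈ s₀ ∨ ∃ l ∈ os, ∃ i ∈ List.range (t.length - l + 1), p = pvSliceAt t i l := by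
    intro os
    induction os with
    | nil => simp
    | cons o os ih =>
      intro s₀
      rw [List.foldl_cons, ih, PySem.Set.mem_foldl_add]
      constructor
      · rintro (⟨h | ⟨i, hi, hp⟩⟩ | ⟨l, hl, i, hi, hp⟩)
        · exact Or.inl h
        · exact Or.inr ⟨o, List.mem_cons_self, i, hi, hp⟩
        · exact Or.inr ⟨l, List.mem_cons_of_mem o hl, i, hi, hp⟩
      · rintro (h | ⟨l, hl, i, hi, hp⟩)
        · exact Or.inl (Or.inl h)
        · rcases List.mem_cons.mp hl with he | he
          · subst he; exact Or.inl (Or.inr ⟨i, hi, hp⟩)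
          · exact Or.inr ⟨l, he, i, hi, hp⟩
  rw [base]
  simp [PySem.Set.empty]

-- B side: for a word no longer than L, the index lookup IS Python's 'p in t'
theorem pv_subs_isIn (t : List Char) (L : Nat) (p : List Char) (hL : p.length ≤ L) :
    PySem.Set.contains (pvSubs t L) p = PySem.Chars.isIn p t := by
  rw [Bool.eq_iff_iff, PySem.Set.contains_iff, pv_mem_subs,
      ← PySem.Chars.exists_prefix_drop_iff_isIn]
  constructor
  · rintro ⟨l, _, i, _, hp⟩
    rw [pv_sliceAt_eq] at hp
    exact ⟨i, hp ▸ List.take_prefix l (t.drop i)⟩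
  · rintro ⟨j, hj⟩
    have hlen : p.length ≤ t.length - j := by
      simpa using hj.length_le
    rcases Nat.eq_zero_or_pos p.length with h0 | hpos
    · refine ⟨0, (by simp), 0, (by simp), ?_⟩
      rw [pv_sliceAt_eq]
      simp [List.length_eq_zero_iff.mp h0]
    · have hj' : j ≤ t.length - p.length := by omega
      have hpt : p.length ≤ t.length := by omega
      refine ⟨p.length, (by simp [List.mem_range]; omega), j, (by simp [List.mem_range]; omega), ?_⟩
      rw [pv_sliceAt_eq]
      exact List.prefix_iff_eq_take.mp hj

-- ===== VERDICT (by name: the statement is the Claim_ definition above) =====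
theorem clasificarr_sentimientos_spec : Claim_equal_clasificarr_sentimientos := by
  intro texto positivos negativos _
  show _ = _
  unfold clasificarr_sentimientos clasificarr_sentimientos_alt
  simp only []
  rw [pv_foldl_getD_other (PySem.Str.lower texto) "negativo" "positivo" (by decide),
      pv_foldl_getD_self (PySem.Str.lower texto) "negativo",
      pv_foldl_getD_self (PySem.Str.lower texto) "positivo",
      pv_foldl_getD_other (PySem.Str.lower texto) "positivo" "negativo" (by decide)]
  have h1 : (PySem.Dict.ofList [("positivo", (0:Int)), ("negativo", 0)]).getD "positivo" 0 = 0 := by decide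
  have h2 : (PySem.Dict.ofList [("positivo", (0:Int)), ("negativo", 0)]).getD "negativo" 0 = 0 := by decide
  rw [h1, h2, pv_countIn_eq, pv_countIn_eq]
  have hcong : ∀ (l : List String), (∀ p ∈ l, p.toList.length ≤ pvMaxLen negativos (pvMaxLen positivos 0)) →
      l.countP (fun p => PySem.Set.contains
          (pvSubs (PySem.Str.lower texto).toList (pvMaxLen negativos (pvMaxLen positivos 0))) p.toList)
        = l.countP (fun p => PySem.Str.isIn p (PySem.Str.lower texto)) := by
    intro l hb
    apply List.countP_congr
    intro p hp
    rw [pv_subs_isIn _ _ _ (hb p hp)]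
    simp [pysem]
  rw [hcong positivos (fun p hp => le_trans (pv_mem_maxLen positivos _ p hp) (pv_maxLen_le negativos _)),
      hcong negativos (fun p hp => pv_mem_maxLen negativos _ p hp)]
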